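-- pv_equiv track=rewrite | github.com/safimousa123/NetGuard | NetGuard/scanner.py | _analyze_http_headers
-- ===== SOURCE A (Python) =====
-- def _analyze_http_headers(headers):
--     """Analyze HTTP headers for security issues"""
--     issues = []
--     headers_lower = headers.lower()
--
--     if "server:" in headers_lower:
--         server_line = [line for line in headers.split('\n') if line.lower().startswith('server:')]
--         if server_line:
--             issues.append(f"Server header exposed: {server_line[0].strip()}")
--
--     if "x-powered-by:" in headers_lower:
--         powered_line = [line for line in headers.split('\n') if line.lower().startswith('x-powered-by:')]
--         if powered_line:
--             issues.append(f"Technology stack exposed: {powered_line[0].strip()}")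
--
--     # Check for missing security headers
--     security_headers = ["x-frame-options", "x-content-type-options", "strict-transport-security"]
--     for header in security_headers:
--         if header not in headers_lower:
--             issues.append(f"Missing security header: {header}")
--
--     return issues
-- ===== SOURCE B (Python) =====
-- def _analyze_http_headers(headers):
--     """Analyze HTTP headers for security issues (single pass over lines via a first-occurrence dict)"""
--     headers_lower = headers.lower()
--     found = {}
--     for line in headers.split('\n'):
--         i = line.find(':')
--         if i != -1:
--             found.setdefault(line[:i].lower(), line)
--     issues = []
--     if 'server' in found:
--         issues.append(f"Server header exposed: {found['server'].strip()}")
--     if 'x-powered-by' in found: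
--         issues.append(f"Technology stack exposed: {found['x-powered-by'].strip()}")
--     issues.extend(f"Missing security header: {h}"
--                   for h in ("x-frame-options", "x-content-type-options", "strict-transport-security")
--                   if h not in headers_lower)
--     return issues
-- ===== Notes on version B (the rewrite author's own statement) =====
-- stated objective: idiomatic
-- what changed: Replaces A's two guarded whole-text substring checks each followed by a full filter pass over the lines with a single pass over headers.split(' ') that builds a first-occurrence dict keyed by each line's lowercased pre-colon prefix, from which the server and x-powered-by lines are looked up; the missing-security-header substring tests are kept as whole-text checks.
import Mathlib
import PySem

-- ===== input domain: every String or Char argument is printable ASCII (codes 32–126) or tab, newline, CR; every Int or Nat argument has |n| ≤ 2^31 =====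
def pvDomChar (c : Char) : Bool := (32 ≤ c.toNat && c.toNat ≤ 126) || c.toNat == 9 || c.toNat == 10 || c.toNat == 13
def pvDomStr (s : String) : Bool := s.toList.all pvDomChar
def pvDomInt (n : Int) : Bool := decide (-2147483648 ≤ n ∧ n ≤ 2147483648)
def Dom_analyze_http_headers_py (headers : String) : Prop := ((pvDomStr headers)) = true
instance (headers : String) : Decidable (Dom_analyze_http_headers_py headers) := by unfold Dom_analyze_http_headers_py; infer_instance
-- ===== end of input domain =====

-- B replaces A's two guarded full-text rescans with one pass over the lines building a
-- first-occurrence dict keyed by the lowercased text before the first ':' (objective: idiomatic).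

-- ===== PORT A =====
def analyze_http_headers_py (headers : String) : List String :=
  let issues : List String := []
  let headers_lower := PySem.Str.lower headers
  let issues :=
    if PySem.Str.isIn "server:" headers_lower then
      let server_line := ((PySem.Str.split? headers "\n").getD []).filter
        (fun line => PySem.Str.startswith (PySem.Str.lower line) "server:")
      match server_line with
      | [] => issues
      | l :: _ => issues ++ ["Server header exposed: " ++ PySem.Str.strip l]
    else issues
  let issues :=
    if PySem.Str.isIn "x-powered-by:" headers_lower then
      let powered_line := ((PySem.Str.split? headers "\n").getD []).filter
        (fun line => PySem.Str.startswith (PySem.Str.lower line) "x-powered-by:")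
      match powered_line with
      | [] => issues
      | l :: _ => issues ++ ["Technology stack exposed: " ++ PySem.Str.strip l]
    else issues
  ["x-frame-options", "x-content-type-options", "strict-transport-security"].foldl
    (fun acc header =>
      if PySem.Str.isIn header headers_lower then acc
      else acc ++ ["Missing security header: " ++ header]) issues

-- ===== PORT B =====
def analyze_http_headers_py_alt (headers : String) : List String :=
  let headers_lower := PySem.Str.lower headers
  let found : PySem.Dict String String :=
    ((PySem.Str.split? headers "\n").getD []).foldl
      (fun d line =>
        let i := PySem.Str.find line ":"
        if i = -1 then d
        else d.setdefault (PySem.Str.lower (PySem.Str.slice line none (some i))) line)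
      PySem.Dict.empty
  let issues : List String :=
    if found.contains "server" then
      ["Server header exposed: " ++ PySem.Str.strip (found.getD "server" "")]
    else []
  let issues := issues ++
    (if found.contains "x-powered-by" then
      ["Technology stack exposed: " ++ PySem.Str.strip (found.getD "x-powered-by" "")]
    else [])
  issues ++ (["x-frame-options", "x-content-type-options", "strict-transport-security"].filterMap
    (fun h => if PySem.Str.isIn h headers_lower then none
              else some ("Missing security header: " ++ h)))

-- ===== PRECONDITION & SPEC =====
def Spec_analyze_http_headers_py (headers : String) (out : List String) : Prop := out = analyze_http_headers_py_alt headers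
instance (headers : String) (out : List String) : Decidable (Spec_analyze_http_headers_py headers out) := by unfold Spec_analyze_http_headers_py; infer_instance

-- ===== CLAIM (what is proved, stated in full; the proofs are below) =====
def Claim_equal_analyze_http_headers_py : Prop := ∀ (headers : String), Dom_analyze_http_headers_py headers → Spec_analyze_http_headers_py headers (analyze_http_headers_py headers)

-- ===== LEMMAS AND PROOFS =====

-- B's per-line key: the lowercased text before the first ':' (none if the line has no ':').
def keyOf? (line : String) : Option String :=
  if PySem.Str.find line ":" = -1 then none
  else some (PySem.Str.lower (PySem.Str.slice line none (some (PySem.Str.find line ":"))))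

def foundDict (headers : String) : PySem.Dict String String :=
  ((PySem.Str.split? headers "\n").getD []).foldl
    (fun d line => match keyOf? line with
      | none => d
      | some key => d.setdefault key line)
    PySem.Dict.empty

theorem stepB_eq :
    (fun (d : PySem.Dict String String) (line : String) =>
      let i := PySem.Str.find line ":"
      if i = -1 then d
      else d.setdefault (PySem.Str.lower (PySem.Str.slice line none (some i))) line)
    = (fun (d : PySem.Dict String String) (line : String) => match keyOf? line with
        | none => d
        | some key => d.setdefault key line) := by
  funext d line
  show (if PySem.Str.find line ":" = -1 then d
        else d.setdefault (PySem.Str.lower (PySem.Str.slice line none (some (PySem.Str.find line ":")))) line) = _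
  unfold keyOf?
  by_cases h : PySem.Str.find line ":" = -1
  · rw [if_pos h, if_pos h]
  · rw [if_neg h, if_neg h]

theorem lowerChar_eq_colon {c : Char} (h : PySem.Chars.lowerChar c = ':') : c = ':' := by
  by_contra hne
  unfold PySem.Chars.lowerChar PySem.Chars.isupper at h
  split_ifs at h with hu
  · simp only [Bool.and_eq_true, decide_eq_true_eq] at hu
    have h1 : 65 ≤ c.toNat := hu.1
    have h2 : c.toNat ≤ 90 := hu.2
    have hv : (Char.ofNat (c.toNat + 32)).toNat = c.toNat + 32 := by
      simp [Char.toNat_ofNat, Nat.isValidChar]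
      omega
    rw [h] at hv
    have : (':' : Char).toNat = 58 := by decide
    omega
  · exact hne h

theorem singleton_prefix_iff (a : Char) (l : List Char) : [a] <+: l ↔ l.head? = some a := by
  cases l <;> simp [List.cons_prefix_cons, eq_comm]

theorem go_infix (sep : List Char) : ∀ (fuel : Nat) (l cur : List Char) (acc : List (List Char)) (piece : List Char),
    piece ∈ PySem.Chars.splitOn.go sep fuel l cur acc →
    piece ∈ acc ∨ (∃ pre, pre <+: l ∧ piece = cur.reverse ++ pre) ∨ piece <:+: l := by
  intro fuel
  induction fuel with
  | zero =>
    intro l cur acc piece h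
    unfold PySem.Chars.splitOn.go at h
    simp only [List.mem_reverse, List.mem_cons] at h
    rcases h with h | h
    · right; left; exact ⟨l, List.prefix_refl l, h⟩
    · left; exact h
  | succ fuel ih =>
    intro l cur acc piece h
    match l with
    | [] =>
      unfold PySem.Chars.splitOn.go at h
      simp only [List.mem_reverse, List.mem_cons] at h
      rcases h with h | h
      · right; left; exact ⟨[], List.nil_prefix, by simpa using h⟩
      · left; exact h
    | c :: rest =>
      unfold PySem.Chars.splitOn.go at h
      by_cases hp : sep.isPrefixOf (c :: rest) = true
      · rw [if_pos hp] at h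
        rcases ih _ _ _ _ h with h | ⟨pre, hpre, hpc⟩ | h
        · rcases List.mem_cons.mp h with h | h
          · right; left; exact ⟨[], List.nil_prefix, by simpa using h⟩
          · left; exact h
        · right; right
          rw [hpc]
          simpa using (hpre.isInfix).trans ((List.drop_suffix _ _).isInfix)
        · right; right; exact h.trans ((List.drop_suffix _ _).isInfix)
      · rw [if_neg hp] at h
        rcases ih _ _ _ _ h with h | ⟨pre, hpre, hpc⟩ | h
        · left; exact h
        · right; left
          exact ⟨c :: pre, List.cons_prefix_cons.mpr ⟨rfl, hpre⟩, by simp [hpc]⟩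
        · right; right; exact h.trans ⟨[c], [], by simp⟩

theorem mem_lines_infix {headers line : String}
    (h : line ∈ (PySem.Str.split? headers "\n").getD []) :
    line.toList <:+: headers.toList := by
  have hsplit : (PySem.Str.split? headers "\n").getD []
      = List.map String.ofList (PySem.Chars.splitOn headers.toList ['\n']) := rfl
  rw [hsplit, List.mem_map] at h
  obtain ⟨piece, hmem, hline⟩ := h
  unfold PySem.Chars.splitOn at hmem
  rcases go_infix ['\n'] _ _ _ _ _ hmem with hc | ⟨pre, hpre, hpc⟩ | hc
  · simp at hc
  · subst hline
    rw [String.toList_ofList, hpc]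
    simpa using hpre.isInfix
  · subst hline
    rw [String.toList_ofList]
    exact hc

set_option maxHeartbeats 1000000 in
theorem keyOf?_eq_some_iff (line k : String) (hk : (':' : Char) ∉ k.toList) :
    keyOf? line = some k
      ↔ PySem.Chars.startswith (PySem.Chars.lower line.toList) (k.toList ++ [':']) = true := by
  have hcol : ((":" : String).toList) = [':'] := rfl
  constructor
  · intro h
    unfold keyOf? at h
    split_ifs at h with hneg
    have h0 : 0 ≤ PySem.Str.find line ":" := by
      have := PySem.Chars.neg_one_le_find line.toList [':']
      rw [PySem.Str.find_eq, hcol] at *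
      omega
    have hval := congrArg String.toList (Option.some.inj h)
    rw [PySem.Str.toList_lower, PySem.Str.toList_slice, PySem.Chars.slice_eq_listSlice,
        PySem.List.slice_to _ h0] at hval
    rw [PySem.Str.find_eq, hcol] at h0 hval
    obtain ⟨hfpre, -⟩ := PySem.Chars.find_spec h0
    set n := (PySem.Chars.find line.toList [':']).toNat with hn
    have hget : line.toList[n]? = some ':' := by
      rw [← List.head?_drop]
      exact (singleton_prefix_iff _ _).mp hfpre
    have hlt : n < line.toList.length := by
      have := List.getElem?_eq_some_iff.mp hget
      exact this.1
    have hwlen : k.toList.length = n := by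
      have h2 := congrArg List.length hval
      simp only [PySem.Chars.lower, List.length_map, List.length_take] at h2
      omega
    rw [PySem.Chars.startswith, List.isPrefixOf_iff_prefix]
    obtain ⟨t, ht⟩ : ∃ t, line.toList.drop n = ':' :: t := by
      cases hd : line.toList.drop n with
      | nil => rw [← List.head?_drop, hd] at hget; simp at hget
      | cons c tl =>
        rw [← List.head?_drop, hd] at hget
        simp at hget
        exact ⟨tl, by rw [hget]⟩
    have hsplit : line.toList = line.toList.take n ++ (':' :: t) := by
      rw [← ht, List.take_append_drop]
    rw [PySem.Chars.lower]
    conv_rhs => rw [hsplit]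
    rw [List.map_append, List.map_cons]
    have hlow : PySem.Chars.lowerChar ':' = ':' := by decide
    rw [hlow]
    have hkmap : List.map PySem.Chars.lowerChar (line.toList.take n) = k.toList := by
      rw [← hval]; rfl
    rw [hkmap]
    exact ⟨List.map PySem.Chars.lowerChar t, by simp⟩
  · intro h
    rw [PySem.Chars.startswith, List.isPrefixOf_iff_prefix] at h
    obtain ⟨t, ht⟩ := h
    rw [PySem.Chars.lower] at ht
    set n := k.toList.length with hn
    have hget : line.toList[n]? = some ':' := by
      have h1 : (List.map PySem.Chars.lowerChar line.toList)[n]? = some ':' := by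
        rw [← ht, List.append_assoc, List.getElem?_append_right (by simp [hn])]
        simp [hn]
      rw [List.getElem?_map] at h1
      cases hc : line.toList[n]? with
      | none => rw [hc] at h1; simp at h1
      | some c =>
        rw [hc] at h1
        simp only [Option.map_some, Option.some.injEq] at h1
        rw [lowerChar_eq_colon h1]
    have hbefore : ∀ j, j < n → line.toList[j]? ≠ some ':' := by
      intro j hj heq
      have h1 : (List.map PySem.Chars.lowerChar line.toList)[j]? = some ':' := by
        rw [List.getElem?_map, heq]; rfl
      rw [← ht, List.getElem?_append_left (by
            simp only [List.length_append, List.length_cons, List.length_nil]; omega),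
          List.getElem?_append_left (by omega)] at h1
      exact hk (List.mem_of_getElem? h1)
    have hpren : [':'] <+: line.toList.drop n := by
      rw [singleton_prefix_iff, List.head?_drop]; exact hget
    have hinf : [':'] <:+: line.toList :=
      hpren.isInfix.trans (List.drop_suffix _ _).isInfix
    have h0 : 0 ≤ PySem.Chars.find line.toList [':'] :=
      (PySem.Chars.find_nonneg_iff _ _).mpr hinf
    obtain ⟨hfpre, hfmin⟩ := PySem.Chars.find_spec h0
    set m := (PySem.Chars.find line.toList [':']).toNat with hm
    have hgm : line.toList[m]? = some ':' := by
      rw [← List.head?_drop]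
      exact (singleton_prefix_iff _ _).mp hfpre
    have hmn : m = n := by
      rcases lt_trichotomy m n with hlt | heq | hgt
      · exact absurd hgm (hbefore m hlt)
      · exact heq
      · exact absurd hpren (hfmin n hgt)
    have hfind : PySem.Chars.find line.toList [':'] = (n : Int) := by omega
    have hsf : PySem.Str.find line ":" = (n : Int) := by
      rw [PySem.Str.find_eq]; exact hfind
    unfold keyOf?
    rw [hsf, if_neg (by omega)]
    congr 1
    apply String.toList_inj.mp
    rw [PySem.Str.toList_lower, PySem.Str.toList_slice, PySem.Chars.slice_eq_listSlice,
        PySem.List.slice_to _ (by omega : (0:Int) ≤ (n : Int))]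
    have hnn : ((n : Int)).toNat = n := Int.toNat_natCast n
    rw [hnn, PySem.Chars.lower, List.map_take, ← ht, List.append_assoc]
    exact List.take_left' hn.symm

theorem fold_get?_eq (lines : List String) (k : String) : ∀ d : PySem.Dict String String,
    (lines.foldl
      (fun d line => match keyOf? line with
        | none => d
        | some key => d.setdefault key line) d).get? k
    = (d.get? k).or (lines.find? (fun l => keyOf? l == some k)) := by
  induction lines with
  | nil => intro d; simp
  | cons l ls ih =>
    intro d
    simp only [List.foldl_cons, List.find?_cons]
    cases hkey : keyOf? l with
    | none => exact ih d
    | some key =>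
      by_cases hkk : key = k
      · subst hkk
        have hb : ((some key : Option String) == some key) = true := by simp
        rw [hb]
        simp only []
        rw [ih, PySem.Dict.get?_setdefault_self]
        cases d.get? key <;> simp
      · have hb : ((some key : Option String) == some k) = false := by simp [hkk]
        rw [hb]
        simp only []
        rw [ih, PySem.Dict.get?_setdefault_of_ne _ _ (fun h => hkk h.symm)]

theorem stage_eq (headers : String) (issues : List String) (k kc msg : String)
    (hk : (':' : Char) ∉ k.toList) (hkc : kc.toList = k.toList ++ [':']) :
    (if PySem.Str.isIn kc (PySem.Str.lower headers) = true then
       match ((PySem.Str.split? headers "\n").getD []).filter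
           (fun line => PySem.Str.startswith (PySem.Str.lower line) kc) with
       | [] => issues
       | l :: _ => issues ++ [msg ++ PySem.Str.strip l]
     else issues)
    = issues ++
      (if (foundDict headers).contains k = true then
         [msg ++ PySem.Str.strip ((foundDict headers).getD k "")] else []) := by
  have hpred : ∀ l : String,
      (PySem.Str.startswith (PySem.Str.lower l) kc) = (keyOf? l == some k) := by
    intro l
    have hiff := keyOf?_eq_some_iff l k hk
    rw [PySem.Str.startswith_eq, PySem.Str.toList_lower, hkc]
    by_cases hkey : keyOf? l = some k
    · rw [hiff.mp hkey, hkey]; simp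
    · have h1 : (keyOf? l == some k) = false := by
        simp only [beq_eq_false_iff_ne, ne_eq]; exact hkey
      rw [h1]
      by_contra hb
      exact hkey (hiff.mpr (by
        cases hcs : PySem.Chars.startswith (PySem.Chars.lower l.toList) (k.toList ++ [':']) with
        | true => rfl
        | false => rw [hcs] at hb; simp at hb))
  rw [List.filter_congr (fun x _ => hpred x)]
  have hfound : (foundDict headers).get? k
      = ((PySem.Str.split? headers "\n").getD []).find? (fun l => keyOf? l == some k) := by
    unfold foundDict
    rw [fold_get?_eq]
    simp [PySem.Dict.get?_empty]
  cases hfind : ((PySem.Str.split? headers "\n").getD []).find? (fun l => keyOf? l == some k) with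
  | none =>
    have hfil : ((PySem.Str.split? headers "\n").getD []).filter (fun l => keyOf? l == some k) = [] := by
      rw [List.filter_eq_nil_iff]
      intro a ha
      have := List.find?_eq_none.mp hfind a ha
      simpa using this
    have hcont : (foundDict headers).contains k = false := by
      rw [PySem.Dict.contains_eq_isSome_get?, hfound, hfind]; rfl
    rw [hfil, hcont]
    split_ifs <;> simp_all
  | some l =>
    have hmem := List.mem_of_find?_eq_some hfind
    have hpl : (keyOf? l == some k) = true := by
      have := List.find?_some hfind
      simpa using this
    have hguard : PySem.Str.isIn kc (PySem.Str.lower headers) = true := by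
      have hsw : PySem.Chars.startswith (PySem.Chars.lower l.toList) kc.toList = true := by
        have := hpred l
        rw [PySem.Str.startswith_eq, PySem.Str.toList_lower] at this
        rw [this]; exact hpl
      rw [PySem.Chars.startswith, List.isPrefixOf_iff_prefix] at hsw
      rw [PySem.Str.isIn_eq, PySem.Str.toList_lower]
      rw [PySem.Chars.isIn_iff_infix]
      have h1 : kc.toList <:+: PySem.Chars.lower l.toList := hsw.isInfix
      have h2 : PySem.Chars.lower l.toList <:+: PySem.Chars.lower headers.toList := by
        unfold PySem.Chars.lower
        exact (mem_lines_infix hmem).map _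
      exact h1.trans h2
    have hcont : (foundDict headers).contains k = true := by
      rw [PySem.Dict.contains_eq_isSome_get?, hfound, hfind]; rfl
    have hgetD : (foundDict headers).getD k "" = l := by
      rw [PySem.Dict.getD_eq_get?_getD, hfound, hfind]; rfl
    have hhead : (((PySem.Str.split? headers "\n").getD []).filter
        (fun l => keyOf? l == some k)).head? = some l := by
      rw [List.head?_filter]; exact hfind
    cases hfil : ((PySem.Str.split? headers "\n").getD []).filter (fun l => keyOf? l == some k) with
    | nil => rw [hfil] at hhead; simp at hhead
    | cons a rest =>
      rw [hfil] at hhead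
      simp only [List.head?_cons, Option.some.injEq] at hhead
      subst hhead
      rw [if_pos hguard, hcont]
      simp [hgetD]

theorem seg3_eq (hl : String) (init : List String) :
    (["x-frame-options", "x-content-type-options", "strict-transport-security"].foldl
      (fun acc header =>
        if PySem.Str.isIn header hl then acc
        else acc ++ ["Missing security header: " ++ header]) init)
    = init ++ (["x-frame-options", "x-content-type-options", "strict-transport-security"].filterMap
      (fun h => if PySem.Str.isIn h hl then none
                else some ("Missing security header: " ++ h))) := by
  simp only [List.foldl_cons, List.foldl_nil, List.filterMap_cons, List.filterMap_nil]
  split_ifs <;> simp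

-- ===== VERDICT (by name: the statement is the Claim_ definition above) =====
theorem analyze_http_headers_py_spec : Claim_equal_analyze_http_headers_py := by
  intro headers _
  unfold Spec_analyze_http_headers_py
  unfold analyze_http_headers_py analyze_http_headers_py_alt
  simp only [stepB_eq]
  rw [show (((PySem.Str.split? headers "\n").getD []).foldl
      (fun d line => match keyOf? line with
        | none => d
        | some key => d.setdefault key line) PySem.Dict.empty) = foundDict headers from rfl]
  rw [seg3_eq]
  rw [stage_eq headers _ "server" "server:" "Server header exposed: " (by decide) (by decide)]
  rw [stage_eq headers _ "x-powered-by" "x-powered-by:" "Technology stack exposed: " (by decide) (by decide)]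
  simp
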